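-- pv_equiv track=rewrite | github.com/dinhlam2000/leetcodePractice | Amazon/subArrayBeauty.py | find_total_beauty
-- ===== SOURCE A (Python) =====
-- from collections import deque
--
-- def find_total_beauty(products, k):
--     total_beauty = 0
--     dq = deque()
--
--     for index, product in enumerate(products):
--         while dq and index - dq[0][1] >= k:
--             dq.popleft()
--
--         while dq and dq[-1][0] <= product:
--             dq.pop()
--
--         dq.append([product, index])
--
--         if index >= k - 1:
--             total_beauty += len(dq)
--
--     return total_beauty
-- ===== SOURCE B (Python) =====
-- def find_total_beauty(products, k):
--     total = 0
--     for end in range(k - 1, len(products)):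
--         best = None
--         count = 0
--         for j in range(end, end - k, -1):
--             v = products[j]
--             if best is None or v > best:
--                 best = v
--                 count += 1
--         total += count
--     return total
-- ===== Notes on version B (the rewrite author's own statement) =====
-- stated objective: simpler
-- what changed: Replaces the amortized monotonic deque (front eviction + back popping + length accounting) by a direct nested loop: for each window it scans right-to-left counting strict running-maximum improvements, which equals the deque's size.
-- outside the precondition, e.g. on find_total_beauty([1, 2], 0): A returns 2, B returns 0; on find_total_beauty([5, 1, 3], -1): A returns 3, B returns 0
import Mathlib
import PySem

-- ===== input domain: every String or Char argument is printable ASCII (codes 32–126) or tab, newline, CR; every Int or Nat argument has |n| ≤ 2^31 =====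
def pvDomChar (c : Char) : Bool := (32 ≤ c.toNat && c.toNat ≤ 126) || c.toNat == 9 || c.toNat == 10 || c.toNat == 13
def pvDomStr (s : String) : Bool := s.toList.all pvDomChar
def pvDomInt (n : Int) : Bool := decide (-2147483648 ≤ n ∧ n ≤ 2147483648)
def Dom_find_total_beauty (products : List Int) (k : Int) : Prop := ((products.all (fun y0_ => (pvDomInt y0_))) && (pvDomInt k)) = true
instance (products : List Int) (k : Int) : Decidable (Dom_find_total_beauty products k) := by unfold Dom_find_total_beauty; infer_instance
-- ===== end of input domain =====

-- B replaces A's amortized monotonic deque by a per-window right-to-left strict running-maximum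
-- count (a plainer nested loop, same values on every window sequence with k ≥ 1).

-- ===== PORT A =====
-- `while dq and index - dq[0][1] >= k: dq.popleft()`  (deque held front-first; entries are (product, index))
def pvPopFront (i k : Int) : List (Int × Int) → List (Int × Int)
  | [] => []
  | x :: rest => if i - x.2 ≥ k then pvPopFront i k rest else x :: rest

-- `while dq and dq[-1][0] <= product: dq.pop()`  (pops the maximal back suffix with value ≤ product)
def pvPopBack (p : Int) : List (Int × Int) → List (Int × Int)
  | [] => []
  | x :: rest =>
    match pvPopBack p rest with
    | [] => if x.1 ≤ p then [] else [x]
    | r => x :: r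

-- one iteration of A's `for index, product in enumerate(products)` loop; state = (total_beauty, dq)
def pvStepA (k : Int) (st : Int × List (Int × Int)) (pr : Int × Int) : Int × List (Int × Int) :=
  let dq1 := pvPopFront pr.1 k st.2
  let dq2 := pvPopBack pr.2 dq1
  let dq3 := dq2 ++ [(pr.2, pr.1)]
  (if pr.1 ≥ k - 1 then st.1 + (dq3.length : Int) else st.1, dq3)

def find_total_beauty (products : List Int) (k : Int) : Int :=
  ((PySem.List.enumerate products 0).foldl (pvStepA k) (0, [])).1

-- ===== PORT B =====
-- body of B's inner `for j` loop; state = (best, count)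
def pvBStep (st : Option Int × Int) (v : Int) : Option Int × Int :=
  match st.1 with
  | none => (some v, st.2 + 1)
  | some b => if v > b then (some v, st.2 + 1) else st

-- B's inner loop: `for j in range(end, end - k, -1)` over one window, returning its count
def pvWindowCount (products : List Int) (k e : Int) : Int :=
  ((PySem.List.pyRange e (e - k) (-1)).foldl
    (fun st j => pvBStep st (PySem.List.pyGetD products j 0)) ((none : Option Int), (0 : Int))).2

def find_total_beauty_alt (products : List Int) (k : Int) : Int :=
  (PySem.List.pyRange (k - 1) (products.length : Int) 1).foldl
    (fun total e => total + pvWindowCount products k e) 0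

-- ===== PRECONDITION & SPEC =====
-- Pre_ restricts to the natural domain of a positive window size k ≥ 1 (A never raises; for k ≤ 0
-- A's value — the length of products — is an accident of the deque eviction condition, and B's
-- empty windows naturally yield 0 there).
def Pre_find_total_beauty (products : List Int) (k : Int) : Prop := 1 ≤ k
instance (products : List Int) (k : Int) : Decidable (Pre_find_total_beauty products k) := by unfold Pre_find_total_beauty; infer_instance
def pvWitness_find_total_beauty : List Int × Int := ([1, 3, 2], 2)

def Spec_find_total_beauty (products : List Int) (k : Int) (out : Int) : Prop := out = find_total_beauty_alt products k
instance (products : List Int) (k : Int) (out : Int) : Decidable (Spec_find_total_beauty products k out) := by unfold Spec_find_total_beauty; infer_instance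

-- ===== CLAIM (what is proved, stated in full; the proofs are below) =====
def Claim_equal_find_total_beauty : Prop := ∀ (products : List Int) (k : Int), Dom_find_total_beauty products k → Pre_find_total_beauty products k → Spec_find_total_beauty products k (find_total_beauty products k)

-- ===== LEMMAS AND PROOFS =====

-- the canonical deque content: entries strictly greater than every later entry's value
def pvSmax : List (Int × Int) → List (Int × Int)
  | [] => []
  | x :: rest => if rest.all (fun y => y.1 < x.1) then x :: pvSmax rest else pvSmax rest

-- the window of (value, index) entries after m loop iterations of A
def pvWin (products : List Int) (k : Int) (m : Nat) : List (Int × Int) :=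
  (PySem.List.pyRange (max 0 ((m : Int) - k)) (m : Int) 1).map
    (fun j => (PySem.List.pyGetD products j 0, j))

lemma pvSmax_subset {l : List (Int × Int)} {y : Int × Int} (h : y ∈ pvSmax l) : y ∈ l := by
  induction l with
  | nil => simp [pvSmax] at h
  | cons x rest ih =>
    rw [pvSmax] at h
    split at h
    · rcases List.mem_cons.mp h with h | h
      · simp [h]
      · exact List.mem_cons_of_mem _ (ih h)
    · exact List.mem_cons_of_mem _ (ih h)

lemma pvSmax_ne_nil {l : List (Int × Int)} (h : l ≠ []) : pvSmax l ≠ [] := by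
  induction l with
  | nil => exact absurd rfl h
  | cons x rest ih =>
    rw [pvSmax]
    split
    · simp
    · rename_i hall
      apply ih
      intro hr
      subst hr
      simp at hall

lemma pvSmax_head {l : List (Int × Int)} {z : Int × Int} {t : List (Int × Int)}
    (h : pvSmax l = z :: t) : z ∈ l ∧ ∀ y ∈ l, y.1 ≤ z.1 := by
  induction l generalizing t with
  | nil => simp [pvSmax] at h
  | cons x rest ih =>
    rw [pvSmax] at h
    split at h
    · rename_i hall
      have hz : x = z := (List.cons.injEq ..).mp h |>.1
      subst hz
      refine ⟨List.mem_cons_self, ?_⟩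
      intro y hy
      rcases List.mem_cons.mp hy with hy1 | hy2
      · exact le_of_eq (by rw [hy1])
      · exact le_of_lt (by simpa using (List.all_eq_true.mp hall) y hy2)
    · rename_i hall
      obtain ⟨hz, hle⟩ := ih h
      refine ⟨List.mem_cons_of_mem _ hz, ?_⟩
      intro y hy
      rcases List.mem_cons.mp hy with hy1 | hy2
      · subst hy1
        simp only [List.all_eq_true, not_forall] at hall
        obtain ⟨w, hww, hnlt⟩ := hall
        exact le_trans (not_lt.mp (by simpa using hnlt)) (hle w hww)
      · exact hle y hy2

lemma pvPopBack_of_all_le {l : List (Int × Int)} {p : Int} (h : ∀ y ∈ l, y.1 ≤ p) :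
    pvPopBack p l = [] := by
  induction l with
  | nil => rfl
  | cons x rest ih =>
    rw [pvPopBack, ih (fun y hy => h y (List.mem_cons_of_mem _ hy))]
    simp [h x List.mem_cons_self]

lemma pvSmax_append (l : List (Int × Int)) (z : Int × Int) :
    pvSmax (l ++ [z]) = pvPopBack z.1 (pvSmax l) ++ [z] := by
  induction l with
  | nil => simp [pvSmax, pvPopBack]
  | cons x rest ih =>
    rw [List.cons_append, pvSmax, pvSmax]
    by_cases hall : rest.all (fun y => y.1 < x.1)
    · by_cases hz : z.1 < x.1
      · have hpos : ((rest ++ [z]).all (fun y => y.1 < x.1)) = true := by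
          rw [List.all_append, Bool.and_eq_true]
          exact ⟨hall, by simp [hz]⟩
        rw [if_pos hpos, if_pos hall, ih, pvPopBack]
        cases hcase : pvPopBack z.1 (pvSmax rest) with
        | nil => simp [not_le.mpr hz]
        | cons r rs => simp
      · have hneg : ¬ ((rest ++ [z]).all (fun y => y.1 < x.1)) = true := by
          rw [List.all_append, Bool.and_eq_true]
          intro h
          have h2 := h.2
          simp at h2
          omega
        have hlt_all : ∀ y ∈ pvSmax rest, y.1 ≤ z.1 := by
          intro y hy
          have : y.1 < x.1 := by
            simpa using (List.all_eq_true.mp hall) y (pvSmax_subset hy)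
          omega
        have houter : pvPopBack z.1 (x :: pvSmax rest) = [] := by
          apply pvPopBack_of_all_le
          intro y hy
          rcases List.mem_cons.mp hy with hy1 | hy2
          · rw [hy1]; exact not_lt.mp hz
          · exact hlt_all y hy2
        rw [if_neg hneg, if_pos hall, ih, pvPopBack_of_all_le hlt_all, houter]
    · have hneg : ¬ ((rest ++ [z]).all (fun y => y.1 < x.1)) = true := by
        rw [List.all_append, Bool.and_eq_true]
        exact fun h => hall h.1
      rw [if_neg hneg, if_neg hall, ih]

lemma pvPopFront_of_all {l : List (Int × Int)} {i k : Int} (h : ∀ y ∈ l, i - y.2 < k) :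
    pvPopFront i k l = l := by
  cases l with
  | nil => rfl
  | cons x rest =>
    rw [pvPopFront, if_neg (not_le.mpr (h x List.mem_cons_self))]

lemma pvPopFront_evict {x : Int × Int} {w : List (Int × Int)} {i k : Int}
    (hx : i - x.2 ≥ k) (hw : ∀ y ∈ w, i - y.2 < k) :
    pvPopFront i k (pvSmax (x :: w)) = pvSmax w := by
  have hrest : pvPopFront i k (pvSmax w) = pvSmax w :=
    pvPopFront_of_all (fun y hy => hw y (pvSmax_subset hy))
  rw [pvSmax]
  split
  · rw [pvPopFront, if_pos hx, hrest]
  · exact hrest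

lemma pvBfold_spec (l : List (Int × Int)) :
    ((l.map (·.1)).reverse.foldl pvBStep ((none : Option Int), (0 : Int)))
      = ((pvSmax l).head?.map (·.1), ((pvSmax l).length : Int)) := by
  induction l with
  | nil => simp [pvSmax]
  | cons x rest ih =>
    rw [List.map_cons, List.reverse_cons, List.foldl_append, ih, List.foldl_cons,
      List.foldl_nil, pvSmax]
    by_cases hall : rest.all (fun y => y.1 < x.1)
    · rw [if_pos hall]
      cases hrest : pvSmax rest with
      | nil =>
        have : rest = [] := by
          by_contra hne
          exact pvSmax_ne_nil hne hrest
        subst this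
        simp [pvBStep, pvSmax] at hrest ⊢
      | cons z t =>
        have hz : z.1 < x.1 := by
          simpa using (List.all_eq_true.mp hall) z (pvSmax_subset (hrest ▸ List.mem_cons_self))
        simp [pvBStep, hz]
    · rw [if_neg hall]
      simp only [List.all_eq_true, not_forall] at hall
      obtain ⟨w, hww, hnlt⟩ := hall
      have hwx : x.1 ≤ w.1 := not_lt.mp (by simpa using hnlt)
      cases hrest : pvSmax rest with
      | nil =>
        exact absurd hrest (pvSmax_ne_nil (by rintro rfl; exact absurd hww (by simp)))
      | cons z t =>
        have hzx : ¬ (x.1 > z.1) := by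
          have := (pvSmax_head hrest).2 w hww
          omega
        simp [pvBStep, hzx]

lemma pvWindowCount_eq (products : List Int) (k : Int) (m : Nat) :
    pvWindowCount products k (m : Int)
      = ((pvSmax ((PySem.List.pyRange ((m : Int) + 1 - k) ((m : Int) + 1) 1).map
          (fun j => (PySem.List.pyGetD products j 0, j)))).length : Int) := by
  unfold pvWindowCount
  rw [PySem.List.pyRange_neg_one_eq_reverse]
  have h1 : (m : Int) - k + 1 = (m : Int) + 1 - k := by ring
  rw [h1]
  have key := pvBfold_spec ((PySem.List.pyRange ((m : Int) + 1 - k) ((m : Int) + 1) 1).map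
    (fun j => (PySem.List.pyGetD products j 0, j)))
  rw [List.map_map,
    show ((fun (y : Int × Int) => y.1) ∘ (fun j => (PySem.List.pyGetD products j 0, j)))
      = (fun j => PySem.List.pyGetD products j 0) from rfl,
    ← List.map_reverse, List.foldl_map] at key
  rw [key]

lemma pvInvA (products : List Int) (k : Int) (hk : 1 ≤ k) :
    ∀ m, m ≤ products.length →
      ((PySem.List.enumerate products 0).take m).foldl (pvStepA k) (0, []) =
        ((PySem.List.pyRange (k - 1) (m : Int) 1).foldl
            (fun tot e => tot + pvWindowCount products k e) 0,
         pvSmax (pvWin products k m)) := by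
  intro m
  induction m with
  | zero =>
    intro _
    rw [List.take_zero, List.foldl_nil,
      PySem.List.pyRange_one_eq_nil (by omega : ((0 : Nat) : Int) ≤ k - 1)]
    unfold pvWin
    rw [PySem.List.pyRange_one_eq_nil (by omega : ((0 : Nat) : Int) ≤ max 0 (((0 : Nat) : Int) - k))]
    simp [pvSmax]
  | succ m ih =>
    intro hm1
    have hm : m < products.length := by omega
    have ihe := ih (by omega)
    have htake : (PySem.List.enumerate products 0).take (m + 1)
        = (PySem.List.enumerate products 0).take m ++ [((m : Int), products[m])] := by
      rw [List.take_add_one, PySem.List.getElem?_enumerate]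
      simp [List.getElem?_eq_getElem hm]
    have hpg : PySem.List.pyGetD products ((m : Nat) : Int) 0 = products[m] := by
      rw [PySem.List.pyGetD_natCast]
      exact List.getD_eq_getElem _ _ hm
    -- the deque after front eviction: the window loses its index-(m-k) entry (when it exists)
    have hwin1 : pvPopFront (m : Int) k (pvSmax (pvWin products k m))
        = pvSmax ((PySem.List.pyRange (max 0 ((m : Int) + 1 - k)) (m : Int) 1).map
            (fun j => (PySem.List.pyGetD products j 0, j))) := by
      by_cases hc : (m : Int) - k < 0
      · have e1 : max 0 ((m : Int) - k) = 0 := by omega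
        have e2 : max 0 ((m : Int) + 1 - k) = 0 := by omega
        unfold pvWin
        rw [e1, e2]
        apply pvPopFront_of_all
        intro y hy
        rcases List.mem_map.mp (pvSmax_subset hy) with ⟨j, hj, hyj⟩
        have hb := PySem.List.mem_pyRange_one.mp hj
        rw [← hyj]
        simp only []
        omega
      · have e1 : max 0 ((m : Int) - k) = (m : Int) - k := by omega
        have e2 : max 0 ((m : Int) + 1 - k) = (m : Int) + 1 - k := by omega
        have e3 : (m : Int) - k + 1 = (m : Int) + 1 - k := by ring
        unfold pvWin
        rw [e1, e2, PySem.List.pyRange_one_cons (by omega : (m : Int) - k < (m : Int)),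
          List.map_cons, e3]
        apply pvPopFront_evict
        · simp only []
          omega
        · intro y hy
          rcases List.mem_map.mp hy with ⟨j, hj, hyj⟩
          have hb := PySem.List.mem_pyRange_one.mp hj
          rw [← hyj]
          simp only []
          omega
    -- appending the new entry extends the window to [max 0 (m+1-k), m]
    have hwin2 : pvWin products k (m + 1)
        = (PySem.List.pyRange (max 0 ((m : Int) + 1 - k)) (m : Int) 1).map
            (fun j => (PySem.List.pyGetD products j 0, j)) ++ [(products[m], (m : Int))] := by
      unfold pvWin
      have ec : ((m + 1 : Nat) : Int) = (m : Int) + 1 := by push_cast; ring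
      rw [ec, PySem.List.pyRange_one_succ_right (by omega : max 0 ((m : Int) + 1 - k) ≤ (m : Int)),
        List.map_append]
      simp [hpg]
    have hdq3 : pvPopBack products[m] (pvPopFront (m : Int) k (pvSmax (pvWin products k m)))
          ++ [(products[m], (m : Int))]
        = pvSmax (pvWin products k (m + 1)) := by
      rw [hwin1, hwin2, pvSmax_append]
    rw [htake, List.foldl_append, ihe, List.foldl_cons, List.foldl_nil]
    simp only [pvStepA]
    rw [hdq3]
    by_cases hge : (m : Int) ≥ k - 1
    · have ec : ((m + 1 : Nat) : Int) = (m : Int) + 1 := by push_cast; ring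
      rw [ec, PySem.List.pyRange_one_succ_right (by omega : k - 1 ≤ (m : Int)),
        List.foldl_append, List.foldl_cons, List.foldl_nil, if_pos hge]
      have hlen : ((pvSmax (pvWin products k (m + 1))).length : Int)
          = pvWindowCount products k (m : Int) := by
        rw [pvWindowCount_eq]
        unfold pvWin
        rw [ec, show max 0 ((m : Int) + 1 - k) = (m : Int) + 1 - k from by omega]
      rw [hlen]
    · have h1 : PySem.List.pyRange (k - 1) ((m : Nat) : Int) 1 = [] :=
        PySem.List.pyRange_one_eq_nil (by omega)
      have h2 : PySem.List.pyRange (k - 1) ((m + 1 : Nat) : Int) 1 = [] :=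
        PySem.List.pyRange_one_eq_nil (by push_cast; omega)
      rw [h1, h2, if_neg hge]

-- ===== VERDICT (by name: the statement is the Claim_ definition above) =====
theorem find_total_beauty_spec : Claim_equal_find_total_beauty := by
  intro products k _ hk
  unfold Spec_find_total_beauty find_total_beauty find_total_beauty_alt
  have htake : (PySem.List.enumerate products 0).take products.length
      = PySem.List.enumerate products 0 := by
    conv_lhs => rw [← PySem.List.length_enumerate products 0]
    exact List.take_length
  have h := pvInvA products k hk products.length le_rfl
  rw [htake] at h
  rw [h]
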